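-- pv_equiv track=rewrite | github.com/nahuly/PR | 예산.py | solution
-- ===== SOURCE A (Python) =====
-- from itertools import combinations
--
-- def solution(d, budget):
--     for j in list(range(len(d),1,-1)):
--         a=[]
--         for i in list(combinations(d,j)):
--             a.append(sum(i))
--         mi = min(a)
--         if mi <= budget:
--             res = j
--             break
--     return res
-- ===== SOURCE B (Python) =====
-- from itertools import accumulate
--
-- def solution(d, budget):
--     # minimal sum of any j requests = sum of the j smallest, so sort once
--     # and take prefix sums instead of enumerating all combinations
--     pref = list(accumulate(sorted(d)))
--     for j in range(len(d), 1, -1):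
--         if pref[j - 1] <= budget:
--             return j
--     return 0
-- ===== Notes on version B (the rewrite author's own statement) =====
-- stated objective: alternative
-- what changed: Replaces the per-level enumeration of all size-j combinations (taking the min of each level) with a single sort plus prefix sums, using the fact that the minimal sum of j requests is the sum of the j smallest elements.
import Mathlib
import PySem

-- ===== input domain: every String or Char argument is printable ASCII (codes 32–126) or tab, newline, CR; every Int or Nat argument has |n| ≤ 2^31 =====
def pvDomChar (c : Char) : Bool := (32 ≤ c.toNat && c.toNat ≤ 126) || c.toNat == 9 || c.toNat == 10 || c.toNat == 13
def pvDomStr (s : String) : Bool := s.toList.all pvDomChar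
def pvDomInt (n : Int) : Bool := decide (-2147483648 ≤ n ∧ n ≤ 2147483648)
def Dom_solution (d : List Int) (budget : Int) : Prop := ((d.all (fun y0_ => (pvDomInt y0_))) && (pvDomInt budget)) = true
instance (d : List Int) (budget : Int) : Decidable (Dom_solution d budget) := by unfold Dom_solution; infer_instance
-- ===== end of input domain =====

-- B replaces A's enumeration of all size-j combinations by one sort plus prefix sums
-- (the minimal sum of j requests is the sum of the j smallest).

-- ===== PORT A =====
-- the outer 'for j in range(len(d),1,-1)' with break; returns 0 if the loop falls through
-- (Python A raises NameError there — excluded by Pre_solution)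
def solJ (d : List Int) (budget : Int) : List Int → Int
  | [] => 0
  | j :: rest =>
    let a : List Int := (PySem.List.combinations d j.toNat).map List.sum
    let mi : Int := (PySem.List.min? a (fun x => x)).getD 0
    if mi ≤ budget then j else solJ d budget rest

def solution (d : List Int) (budget : Int) : Int :=
  solJ d budget (PySem.List.pyRange (d.length : Int) 1 (-1))

-- ===== PORT B =====
-- itertools.accumulate(sorted(d))
def accumList (acc : Int) : List Int → List Int
  | [] => []
  | x :: xs => (acc + x) :: accumList (acc + x) xs

-- 'for j in range(len(d),1,-1): if pref[j-1] <= budget: return j' then 'return 0'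
def altLoop (pref : List Int) (budget : Int) : List Int → Int
  | [] => 0
  | j :: rest =>
    if PySem.List.pyGetD pref (j - 1) 0 ≤ budget then j else altLoop pref budget rest

def solution_alt (d : List Int) (budget : Int) : Int :=
  let pref := accumList 0 (PySem.List.sorted d (fun x => x) false)
  altLoop pref budget (PySem.List.pyRange (d.length : Int) 1 (-1))

-- ===== PRECONDITION & SPEC =====
-- Pre_ excludes exactly the inputs on which Python A raises NameError ('res' never assigned):
-- those where no j with 2 ≤ j ≤ len(d) has the sum of the j smallest elements ≤ budget.
def Pre_solution (d : List Int) (budget : Int) : Prop :=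
  ∃ j ∈ List.range (d.length + 1),
    2 ≤ j ∧ ((PySem.List.sorted d (fun x => x) false).take j).sum ≤ budget
instance (d : List Int) (budget : Int) : Decidable (Pre_solution d budget) := by
  unfold Pre_solution; infer_instance

def pvWitness_solution : List Int × Int := ([1, 2, 3], 10)

def Spec_solution (d : List Int) (budget : Int) (out : Int) : Prop := out = solution_alt d budget
instance (d : List Int) (budget : Int) (out : Int) : Decidable (Spec_solution d budget out) := by
  unfold Spec_solution; infer_instance

-- ===== CLAIM (what is proved, stated in full; the proofs are below) =====
def Claim_equal_solution : Prop := ∀ (d : List Int) (budget : Int), Dom_solution d budget → Pre_solution d budget → Spec_solution d budget (solution d budget)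

-- ===== LEMMAS AND PROOFS =====

-- shorthand for Python's sorted(d) (proofs only)
def sortL (d : List Int) : List Int := PySem.List.sorted d (fun x => x) false

theorem sortL_pairwise (d : List Int) : (sortL d).Pairwise (· ≤ ·) := by
  have h := PySem.List.sorted_pairwise d (fun x => x)
  simpa [sortL] using h

theorem sortL_perm (d : List Int) : (sortL d).Perm d := PySem.List.sorted_perm d _ _

theorem sortL_length (d : List Int) : (sortL d).length = d.length :=
  (sortL_perm d).length_eq

theorem sortL_cons (x : Int) (d : List Int) :
    sortL (x :: d) = List.orderedInsert (· ≤ ·) x (sortL d) := by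
  unfold sortL
  apply PySem.List.sorted_id_eq_of_perm_of_pairwise
  · exact (List.perm_orderedInsert _ x _).trans ((PySem.List.sorted_perm d (fun x => x) false).cons x)
  · exact List.Pairwise.orderedInsert x _ (sortL_pairwise d)

-- inserting x: the (k+1)-prefix sum is at most x plus the k-prefix sum of the original
theorem oi_take_le1 (s : List Int) (x : Int) (k : Nat) :
    ((List.orderedInsert (· ≤ ·) x s).take (k + 1)).sum ≤ x + (s.take k).sum := by
  induction s generalizing k with
  | nil => simp [List.orderedInsert]
  | cons y t ih =>
    rw [List.orderedInsert]
    split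
    · simp
    · cases k with
      | zero => simp; omega
      | succ k' =>
        simp only [List.take_succ_cons, List.sum_cons]
        have := ih k'
        omega

-- inserting x into a sorted list cannot increase a prefix sum of length k ≤ len s
theorem oi_take_le2 (s : List Int) (x : Int) (k : Nat)
    (hs : s.Pairwise (· ≤ ·)) (hk : k ≤ s.length) :
    ((List.orderedInsert (· ≤ ·) x s).take k).sum ≤ (s.take k).sum := by
  induction s generalizing k with
  | nil => simp at hk; subst hk; simp
  | cons y t ih =>
    rw [List.orderedInsert]
    split
    · rename_i hxy
      cases k with
      | zero => simp
      | succ k' =>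
        simp only [List.take_succ_cons, List.sum_cons]
        have hk' : k' < (y :: t).length := by simpa using hk
        have hsum := List.sum_take_succ (y :: t) k' hk'
        have hle : x ≤ (y :: t)[k'] := by
          rcases Nat.eq_zero_or_pos k' with h0 | hpos
          · subst h0; simpa using hxy
          · have := (List.pairwise_iff_getElem.mp hs) 0 k' (by simp) hk' hpos
            simp at this
            omega
        rw [List.take_succ_cons, List.sum_cons] at hsum
        omega
    · cases k with
      | zero => simp
      | succ k' =>
        simp only [List.take_succ_cons, List.sum_cons]
        have := ih k' (List.Pairwise.of_cons hs) (by simpa using hk)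
        omega

-- lower bound: every sublist's sum is at least the matching sorted prefix sum
theorem take_sortL_le_sublist {c d : List Int} (h : c.Sublist d) :
    ((sortL d).take c.length).sum ≤ c.sum := by
  induction h with
  | slnil => simp
  | @cons c' d' x h ih =>
    calc ((sortL (x :: d')).take c'.length).sum
        ≤ ((sortL d').take c'.length).sum := by
          rw [sortL_cons]
          exact oi_take_le2 _ x _ (sortL_pairwise d') (by rw [sortL_length]; exact h.length_le)
      _ ≤ c'.sum := ih
  | @cons₂ c' d' x h ih =>
    calc ((sortL (x :: d')).take (x :: c').length).sum
        ≤ x + ((sortL d').take c'.length).sum := by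
          rw [sortL_cons]; exact oi_take_le1 _ x _
      _ ≤ x + c'.sum := by omega
      _ = (x :: c').sum := by simp

-- existence: the sorted prefix sum is achieved by some combination
theorem exists_comb (d : List Int) (j : Nat) (hj : j ≤ d.length) :
    ∃ c ∈ PySem.List.combinations d j, c.sum = ((sortL d).take j).sum := by
  have hsub : List.Subperm ((sortL d).take j) d :=
    ((List.take_sublist j (sortL d)).subperm).trans (sortL_perm d).subperm
  obtain ⟨c, hperm, hsl⟩ := hsub
  refine ⟨c, ?_, hperm.sum_eq⟩
  rw [PySem.List.mem_combinations_iff]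
  exact ⟨hsl, by rw [hperm.length_eq, List.length_take, sortL_length]; omega⟩

-- the heart: min over all size-j combination sums = sorted prefix sum
theorem min_comb (d : List Int) (j : Nat) (hj : j ≤ d.length) :
    (PySem.List.min? ((PySem.List.combinations d j).map List.sum) (fun x => x)).getD 0
      = ((sortL d).take j).sum := by
  obtain ⟨c, hc, hcs⟩ := exists_comb d j hj
  have hmem : ((sortL d).take j).sum ∈ (PySem.List.combinations d j).map List.sum := by
    exact hcs ▸ List.mem_map_of_mem hc
  have hne : (PySem.List.combinations d j).map List.sum ≠ [] := by
    intro h; rw [h] at hmem; exact absurd hmem (List.not_mem_nil)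
  rcases hm : PySem.List.min? ((PySem.List.combinations d j).map List.sum) (fun x => x) with _ | m
  · exact absurd ((PySem.List.min?_eq_none_iff _ _).mp hm) hne
  · have h1 := PySem.List.min?_isMin hm _ hmem
    have h2 : ((sortL d).take j).sum ≤ m := by
      have hm' := PySem.List.min?_mem hm
      obtain ⟨c', hc', hc's⟩ := List.mem_map.mp hm'
      have := take_sortL_le_sublist (PySem.List.sublist_of_mem_combinations hc')
      rw [PySem.List.length_of_mem_combinations hc', hc's] at this
      exact this
    simp only [Option.getD_some]
    omega

theorem accumList_length (acc : Int) (s : List Int) : (accumList acc s).length = s.length := by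
  induction s generalizing acc with
  | nil => rfl
  | cons x xs ih => simp [accumList, ih]

theorem accumList_getElem (s : List Int) (acc : Int) (k : Nat) (hk : k < s.length) :
    (accumList acc s)[k]'(by rwa [accumList_length]) = acc + (s.take (k + 1)).sum := by
  induction s generalizing acc k with
  | nil => simp at hk
  | cons x xs ih =>
    cases k with
    | zero => simp [accumList]
    | succ k' =>
      have := ih (acc + x) k' (by simpa using hk)
      simp only [accumList, List.getElem_cons_succ, List.take_succ_cons, List.sum_cons]
      rw [this]; ring

-- both loops scan the same range and test the same condition at every j
theorem loop_eq (d : List Int) (budget : Int) (js : List Int)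
    (h : ∀ j ∈ js, 1 < j ∧ j ≤ (d.length : Int)) :
    solJ d budget js = altLoop (accumList 0 (sortL d)) budget js := by
  induction js with
  | nil => rfl
  | cons j rest ih =>
    obtain ⟨h1, h2⟩ := h j (List.mem_cons_self ..)
    have hjn : j.toNat ≤ d.length := by omega
    have hcondA := min_comb d j.toNat hjn
    have hlt : j - 1 < ((accumList 0 (sortL d)).length : Int) := by
      rw [accumList_length, sortL_length]; omega
    have hcondB : PySem.List.pyGetD (accumList 0 (sortL d)) (j - 1) 0
        = ((sortL d).take j.toNat).sum := by
      rw [PySem.List.pyGetD_eq_getElem _ _ (by omega) hlt]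
      have hk : (j - 1).toNat < (sortL d).length := by rw [sortL_length]; omega
      have := accumList_getElem (sortL d) 0 (j - 1).toNat hk
      rw [this]
      have : (j - 1).toNat + 1 = j.toNat := by omega
      rw [this]; ring
    simp only [solJ, altLoop, hcondA, hcondB]
    split
    · rfl
    · exact ih (fun x hx => h x (List.mem_cons_of_mem _ hx))

-- ===== VERDICT (by name: the statement is the Claim_ definition above) =====
theorem solution_spec : Claim_equal_solution := by
  intro d budget _ _
  unfold Spec_solution solution solution_alt
  show _ = altLoop (accumList 0 (sortL d)) budget _
  exact loop_eq d budget _ (by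
    intro j hj
    rw [PySem.List.mem_pyRange_neg_one] at hj
    exact ⟨hj.1, hj.2⟩)
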